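-- pv_equiv track=rewrite | github.com/d3nd3/sof_buddy | rsrc/update_callers_from_parents.py | build_switch_module
-- ===== SOURCE A (Python) =====
-- MODULE_ORDER = ['SoF.exe', 'ref_gl.dll', 'player.dll', 'gamex86.dll', 'spcl.dll']
--
-- MODULE_ENUM = {
--     'SoF.exe': 'Module::SofExe',
--     'ref_gl.dll': 'Module::RefDll',
--     'player.dll': 'Module::PlayerDll',
--     'gamex86.dll': 'Module::GameDll',
--     'spcl.dll': 'Module::SpclDll',
-- }
--
-- def hexlit(rva):
--     return f"0x{rva:08X}"
--
-- def build_switch_module(rvas):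
--     mod_to = {}
--     for m, r in rvas:
--         mod_to.setdefault(m, set()).add(r)
--     lines = ["\tswitch (m) {\n"]
--     for mod in MODULE_ORDER:
--         if mod not in mod_to:
--             continue
--         lines.append(f"\t\tcase {MODULE_ENUM.get(mod, 'Module::Unknown')}:\n")
--         lines.append("\t\t\tswitch (fnStartRva) {\n")
--         for r in sorted(mod_to[mod]):
--             lines.append(f"\t\t\t\tcase {hexlit(r)}: return Unknown; // new\n")
--         lines.append("\t\t\t\tdefault: return Unknown;\n\t\t\t}\n")
--     lines.append("\t\tdefault: return Unknown;\n\t}\n")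
--     return ''.join(lines)
-- ===== SOURCE B (Python) =====
-- MODULE_ORDER = ['SoF.exe', 'ref_gl.dll', 'player.dll', 'gamex86.dll', 'spcl.dll']
--
-- MODULE_ENUM = {
--     'SoF.exe': 'Module::SofExe',
--     'ref_gl.dll': 'Module::RefDll',
--     'player.dll': 'Module::PlayerDll',
--     'gamex86.dll': 'Module::GameDll',
--     'spcl.dll': 'Module::SpclDll',
-- }
--
-- def hexlit(rva):
--     return f"0x{rva:08X}"
--
-- def case_block(rvas, mod):
--     # per-module block as one string; '' when the module has no RVAs
--     matches = sorted({r for m, r in rvas if m == mod})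
--     if not matches:
--         return ''
--     return ("\t\tcase " + MODULE_ENUM.get(mod, 'Module::Unknown') + ":\n"
--             + "\t\t\tswitch (fnStartRva) {\n"
--             + ''.join("\t\t\t\tcase " + hexlit(r) + ": return Unknown; // new\n"
--                       for r in matches)
--             + "\t\t\t\tdefault: return Unknown;\n\t\t\t}\n")
--
-- def build_switch_module(rvas):
--     # No grouping dict and no mutable lines list: the result is a direct
--     # concatenation of independently computed per-module case blocks.
--     return ("\tswitch (m) {\n"
--             + ''.join(case_block(rvas, mod) for mod in MODULE_ORDER)
--             + "\t\tdefault: return Unknown;\n\t}\n")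
-- ===== Notes on version B (the rewrite author's own statement) =====
-- stated objective: alternative
-- what changed: B removes A's mutable dict-of-sets index and its appended lines list: each module's case block is computed independently (filter the input for that module, dedup into a set, sort, format as one string) and the result is the plain concatenation of the per-module blocks mapped over MODULE_ORDER.
import Mathlib
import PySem

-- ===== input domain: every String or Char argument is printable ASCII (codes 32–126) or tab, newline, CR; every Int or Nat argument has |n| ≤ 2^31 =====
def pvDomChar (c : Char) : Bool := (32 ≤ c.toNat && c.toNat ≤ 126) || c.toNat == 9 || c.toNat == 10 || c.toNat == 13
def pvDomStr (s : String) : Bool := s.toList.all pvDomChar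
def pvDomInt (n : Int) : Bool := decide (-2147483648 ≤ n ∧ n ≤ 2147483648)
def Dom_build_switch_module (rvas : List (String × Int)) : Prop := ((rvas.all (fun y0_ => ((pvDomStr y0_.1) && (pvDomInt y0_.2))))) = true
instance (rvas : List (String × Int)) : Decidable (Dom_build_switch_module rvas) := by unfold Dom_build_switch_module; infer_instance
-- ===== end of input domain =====

-- B replaces A's mutable dict-of-sets index and appended lines list by independent
-- per-module case blocks (filter → set → sort → one string) concatenated in order
-- (alternative shape, not claimed faster).

-- ===== PORT A =====
-- shared module-level constants (identical in Source A and Source B)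
def MODULE_ORDER : List String :=
  ["SoF.exe", "ref_gl.dll", "player.dll", "gamex86.dll", "spcl.dll"]

def MODULE_ENUM : PySem.Dict String String :=
  PySem.Dict.ofList
    [("SoF.exe", "Module::SofExe"), ("ref_gl.dll", "Module::RefDll"),
     ("player.dll", "Module::PlayerDll"), ("gamex86.dll", "Module::GameDll"),
     ("spcl.dll", "Module::SpclDll")]

def hexDigitChar (d : Nat) : Char := Char.ofNat (if d < 10 then 48 + d else 55 + d)

-- uppercase hex digits of n, no leading zeros (one '0' for n = 0)
def hexDigits (n : Nat) : List Char :=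
  if h : n < 16 then [hexDigitChar n]
  else hexDigits (n / 16) ++ [hexDigitChar (n % 16)]
decreasing_by exact Nat.div_lt_self (by omega) (by omega)

-- hand port of f"0x{rva:08X}" (no PySem primitive): zero-pad to total width 8,
-- the '-' of a negative number counted in the width; exact for every Int
def hexlit (rva : Int) : String :=
  let ds := hexDigits rva.natAbs
  String.mk ('0' :: 'x' ::
    (if rva < 0 then '-' :: (List.replicate (7 - ds.length) '0' ++ ds)
     else List.replicate (8 - ds.length) '0' ++ ds))

-- mod_to.setdefault(m, set()).add(r), one pair
def modToStep (d : PySem.Dict String (PySem.Set Int)) (p : String × Int) :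
    PySem.Dict String (PySem.Set Int) :=
  match d.get? p.1 with
  | some s => d.insert p.1 (PySem.Set.add s p.2)
  | none   => d.insert p.1 (PySem.Set.add PySem.Set.empty p.2)

-- the lines A appends for one present module
def emitA (mod : String) (s : PySem.Set Int) : List String :=
  ["\t\tcase " ++ (MODULE_ENUM.getD mod "Module::Unknown") ++ ":\n",
   "\t\t\tswitch (fnStartRva) {\n"]
  ++ (PySem.List.sorted s (fun r => r) false).map
       (fun r => "\t\t\t\tcase " ++ hexlit r ++ ": return Unknown; // new\n")
  ++ ["\t\t\t\tdefault: return Unknown;\n\t\t\t}\n"]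

def linesStepA (mod_to : PySem.Dict String (PySem.Set Int))
    (lines : List String) (mod : String) : List String :=
  match mod_to.get? mod with
  | none   => lines
  | some s => lines ++ emitA mod s

def build_switch_module (rvas : List (String × Int)) : String :=
  let mod_to := rvas.foldl modToStep PySem.Dict.empty
  let lines := MODULE_ORDER.foldl (linesStepA mod_to) ["\tswitch (m) {\n"]
  PySem.Str.join "" (lines ++ ["\t\tdefault: return Unknown;\n\t}\n"])

-- ===== PORT B =====
-- matches = sorted({r for m, r in rvas if m == mod}); '' when empty, else the block
def case_block (rvas : List (String × Int)) (mod : String) : String :=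
  let matches_ :=
    PySem.List.sorted
      (PySem.Set.ofList ((rvas.filter (fun p => p.1 == mod)).map Prod.snd))
      (fun r => r) false
  if matches_ = [] then ""
  else
    "\t\tcase " ++ (MODULE_ENUM.getD mod "Module::Unknown") ++ ":\n"
      ++ "\t\t\tswitch (fnStartRva) {\n"
      ++ PySem.Str.join ""
           (matches_.map (fun r => "\t\t\t\tcase " ++ hexlit r ++ ": return Unknown; // new\n"))
      ++ "\t\t\t\tdefault: return Unknown;\n\t\t\t}\n"

def build_switch_module_alt (rvas : List (String × Int)) : String :=
  "\tswitch (m) {\n"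
    ++ PySem.Str.join "" (MODULE_ORDER.map (case_block rvas))
    ++ "\t\tdefault: return Unknown;\n\t}\n"

-- ===== PRECONDITION & SPEC =====
def Spec_build_switch_module (rvas : List (String × Int)) (out : String) : Prop := out = build_switch_module_alt rvas
instance (rvas : List (String × Int)) (out : String) : Decidable (Spec_build_switch_module rvas out) := by unfold Spec_build_switch_module; infer_instance

-- ===== CLAIM (what is proved, stated in full; the proofs are below) =====
def Claim_equal_build_switch_module : Prop := ∀ (rvas : List (String × Int)), Dom_build_switch_module rvas → Spec_build_switch_module rvas (build_switch_module rvas)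

-- ===== LEMMAS AND PROOFS =====

-- joining with the empty separator is flattening
theorem intercalate_nil (l : List (List Char)) : ([] : List Char).intercalate l = l.flatten := by
  induction l with
  | nil => rfl
  | cons a t ih => cases t <;> simp_all [List.intercalate]

theorem join_nil_nil : PySem.Str.join "" ([] : List String) = "" := rfl

theorem join_nil_cons (a : String) (l : List String) :
    PySem.Str.join "" (a :: l) = a ++ PySem.Str.join "" l := by
  simp [PySem.Str.join, PySem.Chars.join, intercalate_nil, String.ofList_append]

theorem join_nil_append (l₁ l₂ : List String) :
    PySem.Str.join "" (l₁ ++ l₂) = PySem.Str.join "" l₁ ++ PySem.Str.join "" l₂ := by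
  induction l₁ with
  | nil => simp [join_nil_nil]
  | cons a t ih => simp [join_nil_cons, ih, String.append_assoc]

theorem join_nil_flatMap {α : Type} (l : List α) (g : α → List String) :
    PySem.Str.join "" (l.flatMap g) = PySem.Str.join "" (l.map (fun x => PySem.Str.join "" (g x))) := by
  induction l with
  | nil => rfl
  | cons a t ih => simp [List.flatMap_cons, join_nil_append, join_nil_cons, ih]

theorem set_add_ne_nil (s : PySem.Set Int) (x : Int) : PySem.Set.add s x ≠ [] := by
  rw [PySem.Set.add_eq_ite]
  split_ifs with h
  · intro hs; subst hs; simp at h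
  · simp

-- B's set comprehension, as a fold over the raw input
theorem collect_eq (rvas : List (String × Int)) (mod : String) :
    ∀ s : PySem.Set Int,
      ((rvas.filter (fun p => p.1 == mod)).map Prod.snd).foldl PySem.Set.add s =
      rvas.foldl (fun seen p => if p.1 == mod then PySem.Set.add seen p.2 else seen) s := by
  induction rvas with
  | nil => intro s; rfl
  | cons p rest ih =>
    intro s
    by_cases hpm : p.1 = mod
    · simp [List.filter_cons, hpm, ih]
    · simp [List.filter_cons, hpm, ih]

-- invariant: A's grouping dict looks up, at any key, exactly the fold-collected set
theorem get?_foldl_modToStep (rvas : List (String × Int)) (mod : String) :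
    ∀ (d : PySem.Dict String (PySem.Set Int)) (s : PySem.Set Int),
      d.get? mod = (if s = [] then none else some s) →
      (rvas.foldl modToStep d).get? mod =
        (if rvas.foldl (fun seen p => if p.1 == mod then PySem.Set.add seen p.2 else seen) s = []
         then none
         else some (rvas.foldl (fun seen p => if p.1 == mod then PySem.Set.add seen p.2 else seen) s)) := by
  induction rvas with
  | nil => intro d s h; simpa using h
  | cons p rest ih =>
    intro d s h
    simp only [List.foldl_cons]
    by_cases hpm : p.1 = mod
    · have hb : (p.1 == mod) = true := by simp [hpm]
      rw [hb]
      apply ih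
      simp only [modToStep, hpm]
      simp only [if_true] at h ⊢
      by_cases hs : s = []
      · subst hs
        have h' : d.get? mod = none := by simpa using h
        rw [h']
        simp [PySem.Dict.get?_insert_self, set_add_ne_nil, PySem.Set.empty]
      · rw [if_neg hs] at h
        rw [h, PySem.Dict.get?_insert_self, if_neg (set_add_ne_nil _ _)]
    · have hb : (p.1 == mod) = false := by simp [hpm]
      rw [hb]
      simp only [Bool.false_eq_true, if_false]
      apply ih
      have hne : mod ≠ p.1 := fun hc => hpm hc.symm
      simp only [modToStep]
      cases d.get? p.1 with
      | some t => rw [PySem.Dict.get?_insert_of_ne _ _ hne]; exact h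
      | none => rw [PySem.Dict.get?_insert_of_ne _ _ hne]; exact h

-- A's per-module contribution, joined, is exactly B's case block
theorem join_emit_eq_case_block (rvas : List (String × Int)) (mod : String) :
    PySem.Str.join ""
      (match (rvas.foldl modToStep PySem.Dict.empty).get? mod with
       | none => []
       | some s => emitA mod s) = case_block rvas mod := by
  have key := get?_foldl_modToStep rvas mod PySem.Dict.empty PySem.Set.empty
    (by simp [PySem.Dict.get?_empty, PySem.Set.empty])
  have hof : PySem.Set.ofList ((rvas.filter (fun p => p.1 == mod)).map Prod.snd) =
      rvas.foldl (fun seen p => if p.1 == mod then PySem.Set.add seen p.2 else seen)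
        PySem.Set.empty := by
    rw [PySem.Set.ofList_eq_foldl]
    exact collect_eq rvas mod PySem.Set.empty
  rw [key]
  unfold case_block
  rw [hof]
  by_cases h : rvas.foldl
      (fun seen p => if p.1 == mod then PySem.Set.add seen p.2 else seen) PySem.Set.empty = []
  · rw [if_pos h, if_pos (by rw [PySem.List.sorted_eq_nil_iff]; exact h)]
    rfl
  · rw [if_neg h, if_neg (fun hnil => h ((PySem.List.sorted_eq_nil_iff _ _ _).mp hnil))]
    unfold emitA
    rw [join_nil_append, join_nil_append, join_nil_cons, join_nil_cons, join_nil_cons,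
      join_nil_nil]
    simp [String.append_assoc]

theorem linesStepA_append (d : PySem.Dict String (PySem.Set Int))
    (lines : List String) (mod : String) :
    linesStepA d lines mod =
      lines ++ (match d.get? mod with | none => [] | some s => emitA mod s) := by
  unfold linesStepA
  cases d.get? mod <;> simp

-- ===== VERDICT (by name: the statement is the Claim_ definition above) =====
theorem build_switch_module_spec : Claim_equal_build_switch_module := by
  intro rvas _
  unfold Spec_build_switch_module build_switch_module build_switch_module_alt
  show PySem.Str.join ""
      (MODULE_ORDER.foldl (linesStepA (rvas.foldl modToStep PySem.Dict.empty))
        ["\tswitch (m) {\n"] ++ ["\t\tdefault: return Unknown;\n\t}\n"]) = _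
  have hfold : MODULE_ORDER.foldl (linesStepA (rvas.foldl modToStep PySem.Dict.empty))
      ["\tswitch (m) {\n"] =
      ["\tswitch (m) {\n"] ++ MODULE_ORDER.flatMap
        (fun mod => match (rvas.foldl modToStep PySem.Dict.empty).get? mod with
                    | none => [] | some s => emitA mod s) := by
    rw [show linesStepA (rvas.foldl modToStep PySem.Dict.empty) =
        (fun lines mod => lines ++
          (match (rvas.foldl modToStep PySem.Dict.empty).get? mod with
           | none => [] | some s => emitA mod s)) from
      funext fun lines => funext fun mod => linesStepA_append _ lines mod]
    exact PySem.List.foldl_append_eq_flatMap _ _ _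
  rw [hfold]
  rw [join_nil_append, join_nil_append, join_nil_cons, join_nil_nil, join_nil_flatMap]
  have hmap : MODULE_ORDER.map
      (fun mod => PySem.Str.join ""
        (match (rvas.foldl modToStep PySem.Dict.empty).get? mod with
         | none => [] | some s => emitA mod s)) =
      MODULE_ORDER.map (case_block rvas) :=
    List.map_congr_left fun mod _ => join_emit_eq_case_block rvas mod
  rw [hmap]
  simp [join_nil_cons, join_nil_nil, String.append_assoc]
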